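-- pv_equiv track=rewrite | github.com/Grooomit/Algorithm_exercise | baekjoon/stack/주식가격.py | solution
-- ===== SOURCE A (Python) =====
-- def solution(prices):
--     answer = [0] * len(prices)
--     stack = []
--
--     for i, value in enumerate(prices):
--         while stack and stack[-1][1] > value:
--             idx, _ = stack.pop()
--             answer[idx] = i - idx
--
--         stack.append((i, value))
--
--     for i, v in stack:
--         answer[i] = len(prices) - 1 - i
--
--     return answer
-- ===== SOURCE B (Python) =====
-- def solution(prices):
--     answer = []
--     for i, v in enumerate(prices):
--         c = 0
--         for x in prices[i+1:]:
--             c += 1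
--             if x < v:
--                 break
--         answer.append(c)
--     return answer
-- ===== Notes on version B (the rewrite author's own statement) =====
-- stated objective: simpler
-- what changed: Replaces the monotonic stack plus deferred answer-array fixups with a direct per-index forward scan that counts days until the first strictly smaller price.
import Mathlib
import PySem

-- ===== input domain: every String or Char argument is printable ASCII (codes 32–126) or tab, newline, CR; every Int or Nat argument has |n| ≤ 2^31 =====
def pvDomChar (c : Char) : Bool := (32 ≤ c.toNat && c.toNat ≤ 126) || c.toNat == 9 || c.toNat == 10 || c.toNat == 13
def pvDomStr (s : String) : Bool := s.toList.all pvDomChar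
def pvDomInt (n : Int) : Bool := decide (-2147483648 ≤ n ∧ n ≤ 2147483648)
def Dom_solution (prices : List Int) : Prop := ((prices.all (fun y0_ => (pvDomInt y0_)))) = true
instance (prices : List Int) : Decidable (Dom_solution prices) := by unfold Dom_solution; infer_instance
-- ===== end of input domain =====

-- B replaces A's monotonic stack with a direct per-index forward scan counting
-- days until the first strictly smaller price (simpler; not claimed faster).


-- ===== PORT A =====
-- inner `while stack and stack[-1][1] > value: …` ; stack top is the list head
def popLoop (i : Nat) (value : Int) : List (Nat × Int) → List Int → List (Nat × Int) × List Int
  | [], ans => ([], ans)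
  | (idx, v) :: rest, ans =>
    if v > value then popLoop i value rest (ans.set idx ((i : Int) - (idx : Int)))
    else ((idx, v) :: rest, ans)

-- `for i, value in enumerate(prices): …` carrying (stack, answer)
def mainLoop : Nat → List (Nat × Int) → List Int → List Int → List (Nat × Int) × List Int
  | _, stack, ans, [] => (stack, ans)
  | i, stack, ans, v :: rest =>
    let r := popLoop i v stack ans
    mainLoop (i + 1) ((i, v) :: r.1) r.2 rest

def solution (prices : List Int) : List Int :=
  let r := mainLoop 0 [] (List.replicate prices.length (0 : Int)) prices
  -- `for i, v in stack: answer[i] = len(prices) - 1 - i`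
  r.1.foldl (fun ans jv => ans.set jv.1 ((prices.length : Int) - 1 - (jv.1 : Int))) r.2

-- ===== PORT B =====
-- inner `for x in prices[i+1:]: c += 1; if x < v: break`
def countB (v : Int) : List Int → Int
  | [] => 0
  | x :: xs => if x < v then 1 else 1 + countB v xs

-- outer `for i, v in enumerate(prices): … answer.append(c)`
def solution_alt (prices : List Int) : List Int :=
  (PySem.List.enumerate prices).map
    (fun iv => countB iv.2 (PySem.List.slice prices (some (iv.1 + 1)) none))

-- ===== PRECONDITION & SPEC =====
def Spec_solution (prices : List Int) (out : List Int) : Prop := out = solution_alt prices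
instance (prices : List Int) (out : List Int) : Decidable (Spec_solution prices out) := by unfold Spec_solution; infer_instance

-- ===== CLAIM (what is proved, stated in full; the proofs are below) =====
def Claim_equal_solution : Prop := ∀ (prices : List Int), Dom_solution prices → Spec_solution prices (solution prices)

-- ===== LEMMAS AND PROOFS =====

-- the intended value at index j: days counted forward from j until the first strictly smaller price
def spec (p : List Int) (j : Nat) : Int := countB (p.getD j 0) (p.drop (j + 1))

lemma countB_no_drop (v : Int) : ∀ (rest : List Int), (∀ x ∈ rest, v ≤ x) → countB v rest = rest.length := by
  intro rest
  induction rest with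
  | nil => intro _; simp [countB]
  | cons x xs ih =>
    intro h
    have hx : v ≤ x := h x (by simp)
    simp only [countB, if_neg (by omega : ¬ x < v), ih (fun y hy => h y (by simp [hy]))]
    simp; omega

lemma countB_at_drop (v x : Int) (suf : List Int) :
    ∀ (pre : List Int), (∀ y ∈ pre, v ≤ y) → x < v →
    countB v (pre ++ x :: suf) = pre.length + 1 := by
  intro pre
  induction pre with
  | nil => intro _ hx; simp [countB, hx]
  | cons y ys ih =>
    intro h hx
    have hy : v ≤ y := h y (by simp)
    simp only [List.cons_append, countB, if_neg (by omega : ¬ y < v),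
      ih (fun z hz => h z (by simp [hz])) hx]
    simp; omega

lemma spec_dropAt (p : List Int) (i j : Nat) (hj : j < i) (hi : i < p.length)
    (hbig : ∀ l, j < l → l < i → p.getD j 0 ≤ p.getD l 0)
    (hdrop : p.getD i 0 < p.getD j 0) : spec p j = (i : Int) - (j : Int) := by
  have hsplit : p.drop (j + 1) =
      (p.drop (j + 1)).take (i - (j + 1)) ++ (p.getD i 0 :: p.drop (i + 1)) := by
    have h1 : (p.drop (j + 1)).drop (i - (j + 1)) = p.drop i := by
      rw [List.drop_drop]; congr 1; omega
    have h2 : p.drop i = p.getD i 0 :: p.drop (i + 1) := by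
      rw [List.getD_eq_getElem p 0 hi]
      exact List.drop_eq_getElem_cons hi
    calc p.drop (j + 1)
        = (p.drop (j + 1)).take (i - (j + 1)) ++ (p.drop (j + 1)).drop (i - (j + 1)) := by
          rw [List.take_append_drop]
      _ = _ := by rw [h1, h2]
  have hpre : ∀ y ∈ (p.drop (j + 1)).take (i - (j + 1)), p.getD j 0 ≤ y := by
    intro y hy
    rw [List.mem_iff_getElem] at hy
    obtain ⟨m, hm, rfl⟩ := hy
    have hmlt : m < i - (j + 1) := lt_of_lt_of_le hm (by simp)
    have hmlen : j + 1 + m < p.length := by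
      have := hm; simp [List.length_take, List.length_drop] at this; omega
    have : ((p.drop (j+1)).take (i - (j+1)))[m] = p[j + 1 + m] := by
      rw [List.getElem_take, List.getElem_drop]
    rw [this]
    have := hbig (j + 1 + m) (by omega) (by omega)
    rwa [List.getD_eq_getElem p 0 hmlen] at this
  unfold spec
  rw [hsplit, countB_at_drop _ _ _ _ hpre hdrop]
  have hlen : ((p.drop (j + 1)).take (i - (j + 1))).length = i - (j + 1) := by
    simp [List.length_take, List.length_drop]; omega
  rw [hlen]; omega

lemma spec_alive (p : List Int) (j : Nat) (hj : j < p.length)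
    (hbig : ∀ l, j < l → l < p.length → p.getD j 0 ≤ p.getD l 0) :
    spec p j = (p.length : Int) - 1 - (j : Int) := by
  unfold spec
  rw [countB_no_drop]
  · simp [List.length_drop]; omega
  · intro x hx
    rw [List.mem_iff_getElem] at hx
    obtain ⟨m, hm, rfl⟩ := hx
    have hmlen : j + 1 + m < p.length := by simp [List.length_drop] at hm; omega
    rw [List.getElem_drop]
    have := hbig (j + 1 + m) (by omega) (by omega)
    rwa [List.getD_eq_getElem p 0 hmlen] at this

lemma getD_set_neq (l : List Int) (i j : Nat) (a : Int) (h : i ≠ j) :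
    (l.set i a).getD j 0 = l.getD j 0 := by
  simp [List.getD_eq_getElem?_getD, List.getElem?_set_ne h]

-- invariant on A's stack after processing indices < i
def SInv (p : List Int) (i : Nat) (stack : List (Nat × Int)) : Prop :=
  (∀ jv ∈ stack, jv.2 = p.getD jv.1 0 ∧ jv.1 < i ∧
      ∀ l, jv.1 < l → l < i → jv.2 ≤ p.getD l 0) ∧
  stack.Pairwise (fun a b => b.1 < a.1 ∧ b.2 ≤ a.2)

-- invariant on A's answer array: every already-popped index holds its final value
def AInv (p : List Int) (i : Nat) (stack : List (Nat × Int)) (ans : List Int) : Prop :=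
  ans.length = p.length ∧
  ∀ j, j < i → (∀ w, (j, w) ∉ stack) → ans.getD j 0 = spec p j

lemma popLoop_ok (p : List Int) (i : Nat) (hi : i < p.length) :
    ∀ (stack : List (Nat × Int)) (ans : List Int),
    SInv p i stack → AInv p i stack ans →
    SInv p (i + 1) ((i, p.getD i 0) :: (popLoop i (p.getD i 0) stack ans).1) ∧
    AInv p (i + 1) ((i, p.getD i 0) :: (popLoop i (p.getD i 0) stack ans).1)
      ((popLoop i (p.getD i 0) stack ans).2) := by
  intro stack
  induction stack with
  | nil =>
    intro ans hS hA
    refine ⟨⟨?_, ?_⟩, hA.1, ?_⟩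
    · intro jv hjv
      simp [popLoop] at hjv
      subst hjv
      exact ⟨rfl, by omega, by intro l h1 h2; omega⟩
    · simp [popLoop]
    · intro j hj hnot
      have hji : j ≠ i := by
        intro h
        exact hnot (p.getD i 0) (by simp [popLoop, h])
      exact hA.2 j (by omega) (by intro w; simp)
  | cons hd rest ih =>
    intro ans hS hA
    obtain ⟨idx, v⟩ := hd
    by_cases hpop : v > p.getD i 0
    · -- pop: answer[idx] := i - idx, continue with rest
      have hhd := hS.1 (idx, v) (by simp)
      have hv : v = p.getD idx 0 := hhd.1
      have hidx : idx < i := hhd.2.1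
      have hbig : ∀ l, idx < l → l < i → p.getD idx 0 ≤ p.getD l 0 := by
        intro l h1 h2; rw [← hv]; exact hhd.2.2 l h1 h2
      have hspec : spec p idx = (i : Int) - (idx : Int) :=
        spec_dropAt p i idx hidx hi hbig (by rw [← hv]; omega)
      have hstep : popLoop i (p.getD i 0) ((idx, v) :: rest) ans =
          popLoop i (p.getD i 0) rest (ans.set idx ((i : Int) - (idx : Int))) := by
        simp only [popLoop]
        rw [if_pos hpop]
      rw [hstep]
      apply ih
      · exact ⟨fun jv hjv => hS.1 jv (by simp [hjv]), hS.2.sublist (by simp)⟩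
      · constructor
        · simp [hA.1]
        · intro j hj hnot
          by_cases hji : j = idx
          · subst hji
            rw [List.getD_eq_getElem _ 0 (by rw [List.length_set, hA.1]; omega),
              List.getElem_set_self]
            exact hspec.symm
          · rw [getD_set_neq _ _ _ _ (by omega)]
            refine hA.2 j hj ?_
            intro w hw
            rcases List.mem_cons.mp hw with h | h
            · exact hji (by injection h)
            · exact hnot w h
    · -- stop: stack unchanged
      have hstep : popLoop i (p.getD i 0) ((idx, v) :: rest) ans = ((idx, v) :: rest, ans) := by
        simp only [popLoop]
        rw [if_neg hpop]
      rw [hstep]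
      have hhd := hS.1 (idx, v) (by simp)
      refine ⟨⟨?_, ?_⟩, hA.1, ?_⟩
      · intro jv hjv
        rcases List.mem_cons.mp hjv with h | h
        · subst h
          exact ⟨rfl, by omega, by intro l h1 h2; omega⟩
        · have he := hS.1 jv h
          refine ⟨he.1, by omega, ?_⟩
          intro l h1 h2
          by_cases hl : l = i
          · subst hl
            -- value on stack ≤ top value v ≤ p[i]
            rcases List.mem_cons.mp h with h' | h'
            · rw [h']; simpa using not_lt.mp hpop
            · have := (List.pairwise_cons.mp hS.2).1 jv h'
              have hvle : v ≤ p.getD l 0 := by simpa using not_lt.mp hpop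
              omega
          · exact he.2.2 l h1 (by omega)
      · rw [List.pairwise_cons]
        refine ⟨?_, hS.2⟩
        intro jv hjv
        rcases List.mem_cons.mp hjv with h | h
        · rw [h]; exact ⟨hhd.2.1, by simpa using not_lt.mp hpop⟩
        · have h1 := (List.pairwise_cons.mp hS.2).1 jv h
          have := hhd.2.1
          constructor
          · omega
          · have hvle : v ≤ p.getD i 0 := by simpa using not_lt.mp hpop
            omega
      · intro j hj hnot
        have hji : j ≠ i := by
          intro h
          exact hnot (p.getD i 0) (by simp [h])
        refine hA.2 j (by omega) ?_
        intro w hw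
        exact hnot w (by simp [hw])

lemma mainLoop_ok (p : List Int) :
    ∀ (q : List Int) (i : Nat) (stack : List (Nat × Int)) (ans : List Int),
    p.drop i = q → i ≤ p.length → SInv p i stack → AInv p i stack ans →
    SInv p p.length (mainLoop i stack ans q).1 ∧
    AInv p p.length (mainLoop i stack ans q).1 (mainLoop i stack ans q).2 := by
  intro q
  induction q with
  | nil =>
    intro i stack ans hdrop hle hS hA
    have : p.length ≤ i := by
      have := congrArg List.length hdrop
      simp at this; omega
    have hieq : i = p.length := by omega
    subst hieq
    exact ⟨hS, hA⟩
  | cons v rest ih =>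
    intro i stack ans hdrop hle hS hA
    have hi : i < p.length := by
      have := congrArg List.length hdrop
      simp at this; omega
    have hcons : p.drop i = p.getD i 0 :: p.drop (i + 1) := by
      rw [List.getD_eq_getElem p 0 hi]
      exact List.drop_eq_getElem_cons hi
    rw [hdrop] at hcons
    have hv : v = p.getD i 0 := by injection hcons
    have hrest : p.drop (i + 1) = rest := by injection hcons with _ h; exact h.symm
    have hstep : mainLoop i stack ans (v :: rest) =
        mainLoop (i + 1) ((i, v) :: (popLoop i v stack ans).1) (popLoop i v stack ans).2 rest := by
      simp [mainLoop]
    rw [hstep, hv]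
    have hpl := popLoop_ok p i hi stack ans hS hA
    exact ih (i + 1) _ _ hrest (by omega) hpl.1 hpl.2

lemma foldl_set_ok (p : List Int) :
    ∀ (stack : List (Nat × Int)) (ans : List Int),
    ans.length = p.length →
    (∀ jv ∈ stack, jv.1 < p.length) →
    stack.Pairwise (fun a b => b.1 < a.1 ∧ b.2 ≤ a.2) →
    (stack.foldl (fun a jv => a.set jv.1 ((p.length : Int) - 1 - (jv.1 : Int))) ans).length = p.length ∧
    (∀ j w, (j, w) ∈ stack →
      (stack.foldl (fun a jv => a.set jv.1 ((p.length : Int) - 1 - (jv.1 : Int))) ans).getD j 0 =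
        (p.length : Int) - 1 - (j : Int)) ∧
    (∀ j, (∀ w, (j, w) ∉ stack) →
      (stack.foldl (fun a jv => a.set jv.1 ((p.length : Int) - 1 - (jv.1 : Int))) ans).getD j 0 =
        ans.getD j 0) := by
  intro stack
  induction stack with
  | nil => intro ans hlen _ _; exact ⟨hlen, by simp, by simp⟩
  | cons hd rest ih =>
    intro ans hlen hmem hpw
    obtain ⟨j0, w0⟩ := hd
    have hj0 : j0 < p.length := hmem (j0, w0) (by simp)
    have hlen' : (ans.set j0 ((p.length : Int) - 1 - (j0 : Int))).length = p.length := by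
      simp [hlen]
    have := ih (ans.set j0 ((p.length : Int) - 1 - (j0 : Int))) hlen'
      (fun jv hjv => hmem jv (by simp [hjv])) (List.pairwise_cons.mp hpw).2
    refine ⟨this.1, ?_, ?_⟩
    · intro j w hjw
      rcases List.mem_cons.mp hjw with h | h
      · have hj : j = j0 := by injection h
        subst hj
        have hnot : ∀ w', (j, w') ∉ rest := by
          intro w' hw'
          have := (List.pairwise_cons.mp hpw).1 (j, w') hw'
          omega
        rw [List.foldl_cons, this.2.2 j hnot,
          List.getD_eq_getElem _ 0 (by rw [hlen']; omega), List.getElem_set_self]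
      · exact this.2.1 j w h
    · intro j hnot
      have hji : j ≠ j0 := by
        intro h; subst h; exact hnot w0 (by simp)
      rw [List.foldl_cons, this.2.2 j (fun w hw => hnot w (by simp [hw])),
        getD_set_neq _ _ _ _ (by omega)]

lemma solution_alt_length (p : List Int) : (solution_alt p).length = p.length := by
  simp [solution_alt, PySem.List.length_enumerate]

lemma solution_alt_getElem (p : List Int) (j : Nat) (hj : j < p.length) :
    (solution_alt p)[j]'(by rw [solution_alt_length]; exact hj) = spec p j := by
  unfold solution_alt
  rw [List.getElem_map]
  rw [PySem.List.getElem_enumerate]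
  simp only [spec]
  have h1 : ((0 : Int) + (j : Nat) + 1) = (((j + 1 : Nat) : Int)) := by push_cast; ring
  rw [h1, PySem.List.slice_from_natCast]
  rw [List.getD_eq_getElem p 0 hj]

lemma solution_getD (p : List Int) (j : Nat) (hj : j < p.length) :
    (solution p).getD j 0 = spec p j := by
  unfold solution
  have h0 := mainLoop_ok p p 0 [] (List.replicate p.length (0 : Int))
    (by simp) (by omega)
    (⟨by simp, by simp⟩)
    (⟨by simp, by intro j hj _; omega⟩)
  set r := mainLoop 0 [] (List.replicate p.length (0 : Int)) p with hr
  have hf := foldl_set_ok p r.1 r.2 h0.2.1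
    (fun jv hjv => (h0.1.1 jv hjv).2.1) h0.1.2
  by_cases hex : ∃ w, (j, w) ∈ r.1
  · obtain ⟨w, hw⟩ := hex
    rw [hf.2.1 j w hw]
    have he := h0.1.1 (j, w) hw
    have : spec p j = (p.length : Int) - 1 - (j : Int) := by
      apply spec_alive p j hj
      intro l h1 h2
      have := he.2.2 l h1 h2
      rw [he.1] at this
      exact this
    omega
  · push Not at hex
    rw [hf.2.2 j hex]
    exact h0.2.2 j hj hex

lemma solution_length (p : List Int) : (solution p).length = p.length := by
  unfold solution
  have h0 := mainLoop_ok p p 0 [] (List.replicate p.length (0 : Int))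
    (by simp) (by omega)
    (⟨by simp, by simp⟩)
    (⟨by simp, by intro j hj _; omega⟩)
  set r := mainLoop 0 [] (List.replicate p.length (0 : Int)) p with hr
  exact (foldl_set_ok p r.1 r.2 h0.2.1 (fun jv hjv => (h0.1.1 jv hjv).2.1) h0.1.2).1

-- ===== VERDICT (by name: the statement is the Claim_ definition above) =====
theorem solution_spec : Claim_equal_solution := by
  intro prices _
  unfold Spec_solution
  apply List.ext_getElem
  · rw [solution_length, solution_alt_length]
  · intro j h1 h2
    have hj : j < prices.length := by rwa [solution_length] at h1
    rw [solution_alt_getElem prices j hj, ← solution_getD prices j hj,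
      List.getD_eq_getElem _ 0 h1]
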